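-- pv_equiv track=rewrite | github.com/programmers-algorithm-study-team5/code-review | 황다경/3주차/3주차_무인도 여행.py | solution
-- ===== SOURCE A (Python) =====
-- def solution(maps):
--     n, m = len(maps), len(maps[0])
--
--     visited = [[False] * m for _ in range(n)]
--
--     directions = [(-1, 0), (1, 0), (0, -1), (0, 1)]
--     results = []
--
--     for i in range(n):
--         for j in range(m):
--             if not visited[i][j] and maps[i][j] != 'X':
--                 stack = [(i, j)]
--                 visited[i][j] = True
--                 total = 0
--
--                 while stack:
--                     x, y = stack.pop()
--                     total += int(maps[x][y])
--
--                     for dx, dy in directions: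
--                         nx, ny = x + dx, y + dy
--                         if 0 <= nx < n and 0 <= ny <m and not visited[nx][ny] and maps[nx][ny] != 'X':
--                             visited[nx][ny] = True
--                             stack.append((nx, ny))
--
--                 results.append(total)
--
--     return sorted(results) if results else [-1]
-- ===== SOURCE B (Python) =====
-- def solution(maps):
--     # Layered frontier saturation per component (no stack, no visited matrix):
--     # each component is grown breadth-first by whole layers into a set, then summed.
--     n, m = len(maps), len(maps[0])
--     seen = set()
--     sums = []
--     for i in range(n):
--         for j in range(m):
--             if (i, j) in seen or maps[i][j] == 'X':
--                 continue
--             comp = {(i, j)}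
--             frontier = [(i, j)]
--             while frontier:
--                 nxt = []
--                 for (x, y) in frontier:
--                     for (a, b) in ((x - 1, y), (x + 1, y), (x, y - 1), (x, y + 1)):
--                         if 0 <= a < n and 0 <= b < m and maps[a][b] != 'X' \
--                                 and (a, b) not in comp and (a, b) not in seen:
--                             comp.add((a, b))
--                             nxt.append((a, b))
--                 frontier = nxt
--             seen |= comp
--             sums.append(sum(int(maps[x][y]) for (x, y) in comp))
--     return sorted(sums) if sums else [-1]
-- ===== Notes on version B (the rewrite author's own statement) =====
-- stated objective: alternative
-- what changed: Replaced the per-cell boolean visited matrix plus explicit DFS stack (pop from end, summing cell by cell at pop time) with a per-component layered frontier saturation: each island is grown a whole layer at a time into a set, summed over the finished set, and merged into one global seen set.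
import Mathlib
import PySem

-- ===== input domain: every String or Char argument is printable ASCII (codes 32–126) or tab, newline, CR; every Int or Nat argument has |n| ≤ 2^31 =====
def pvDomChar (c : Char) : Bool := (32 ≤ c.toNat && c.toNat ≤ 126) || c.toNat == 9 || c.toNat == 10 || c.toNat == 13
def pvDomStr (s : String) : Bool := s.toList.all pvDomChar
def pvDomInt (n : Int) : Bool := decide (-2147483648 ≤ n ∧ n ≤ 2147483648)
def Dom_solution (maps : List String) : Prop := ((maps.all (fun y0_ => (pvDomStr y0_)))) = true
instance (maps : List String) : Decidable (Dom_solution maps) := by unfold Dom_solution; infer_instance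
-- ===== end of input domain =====

-- B replaces A's boolean visited matrix + DFS stack (summing at pop time) by a per-component
-- layered frontier saturation into a set, summed once the component is complete ("alternative":
-- same asymptotic cost, different algorithm). Return-value equivalence only; neither mutates input.

-- shared transliteration helpers: maps[x][y] and int(maps[x][y])
def pvCh (maps : List String) (x y : Int) : Char :=
  ((PySem.List.pyGet? maps x).bind (fun s => PySem.Str.pyGet? s y)).getD 'X'
def pvInt (maps : List String) (x y : Int) : Int :=
  (PySem.Int.ofChars? [pvCh maps x y]).getD 0

-- ===== PORT A =====
-- visited[x][y] and visited[x][y] = True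
def pvGetV (v : List (List Bool)) (x y : Int) : Bool :=
  PySem.List.pyGetD (PySem.List.pyGetD v x []) y false
def pvSetV (v : List (List Bool)) (x y : Int) : List (List Bool) :=
  PySem.List.pySetD v x (PySem.List.pySetD (PySem.List.pyGetD v x []) y true)

def pvDirs : List (Int × Int) := [(-1, 0), (1, 0), (0, -1), (0, 1)]

-- body of A's 'for dx, dy in directions'
def pvStepA (maps : List String) (n m x y : Int)
    (st : List (List Bool) × List (Int × Int)) (d : Int × Int) :
    List (List Bool) × List (Int × Int) :=
  let nx := x + d.1
  let ny := y + d.2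
  if 0 ≤ nx ∧ nx < n ∧ 0 ≤ ny ∧ ny < m ∧ pvGetV st.1 nx ny = false ∧ pvCh maps nx ny ≠ 'X'
  then (pvSetV st.1 nx ny, st.2 ++ [(nx, ny)])
  else st

-- A's 'while stack' loop; the fuel only makes the recursion total and is never exhausted
-- (each iteration pops once, and every push marks a previously unvisited cell)
def pvFillA (maps : List String) (n m : Int) :
    Nat → List (List Bool) → List (Int × Int) → Int → List (List Bool) × Int
  | 0, v, _, total => (v, total)
  | fuel + 1, v, stack, total =>
    match PySem.List.pop? stack (-1) with
    | none => (v, total)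
    | some ((x, y), rest) =>
      let st := pvDirs.foldl (pvStepA maps n m x y) (v, rest)
      pvFillA maps n m fuel st.1 st.2 (total + pvInt maps x y)

def solution (maps : List String) : List Int :=
  let n : Int := (maps.length : Int)
  let m : Int := PySem.Str.len (PySem.List.pyGetD maps 0 "")
  let visited0 : List (List Bool) :=
    (PySem.List.pyRange 0 n 1).map (fun _ => List.replicate m.toNat false)
  let st := (PySem.List.pyRange 0 n 1).foldl (fun st i =>
    (PySem.List.pyRange 0 m 1).foldl (fun (st : List (List Bool) × List Int) j =>
      if pvGetV st.1 i j = false ∧ pvCh maps i j ≠ 'X' then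
        let r := pvFillA maps n m ((n * m).toNat + 1) (pvSetV st.1 i j) [(i, j)] 0
        (r.1, st.2 ++ [r.2])
      else st) st) (visited0, ([] : List Int))
  match st.2 with
  | [] => [-1]
  | _ :: _ => PySem.List.sorted st.2 (fun x => x) false

-- ===== PORT B =====
def pvNbrs (x y : Int) : List (Int × Int) := [(x - 1, y), (x + 1, y), (x, y - 1), (x, y + 1)]

-- body of B's 'for (a, b) in ((x-1,y),(x+1,y),(x,y-1),(x,y+1))'
def pvStepB (maps : List String) (n m : Int) (seen : PySem.Set (Int × Int))
    (st : PySem.Set (Int × Int) × List (Int × Int)) (d : Int × Int) :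
    PySem.Set (Int × Int) × List (Int × Int) :=
  if 0 ≤ d.1 ∧ d.1 < n ∧ 0 ≤ d.2 ∧ d.2 < m ∧ pvCh maps d.1 d.2 ≠ 'X' ∧
     PySem.Set.contains st.1 d = false ∧ PySem.Set.contains seen d = false
  then (PySem.Set.add st.1 d, st.2 ++ [d])
  else st

-- B's 'while frontier' loop (fuel only for totality, never exhausted: every kept frontier
-- layer adds at least one new cell of the finite component)
def pvGrowB (maps : List String) (n m : Int) (seen : PySem.Set (Int × Int)) :
    Nat → List (Int × Int) → PySem.Set (Int × Int) → PySem.Set (Int × Int)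
  | 0, _, comp => comp
  | fuel + 1, frontier, comp =>
    match frontier with
    | [] => comp
    | _ :: _ =>
      let st := frontier.foldl
        (fun st c => (pvNbrs c.1 c.2).foldl (pvStepB maps n m seen) st) (comp, [])
      pvGrowB maps n m seen fuel st.2 st.1

def solution_alt (maps : List String) : List Int :=
  let n : Int := (maps.length : Int)
  let m : Int := PySem.Str.len (PySem.List.pyGetD maps 0 "")
  let st := (PySem.List.pyRange 0 n 1).foldl (fun st i =>
    (PySem.List.pyRange 0 m 1).foldl (fun (st : PySem.Set (Int × Int) × List Int) j =>
      if PySem.Set.contains st.1 (i, j) = true ∨ pvCh maps i j = 'X' then st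
      else
        let comp := pvGrowB maps n m st.1 ((n * m).toNat + 2) [(i, j)]
          (PySem.Set.add PySem.Set.empty (i, j))
        (PySem.Set.union st.1 comp,
         st.2 ++ [comp.foldl (fun a c => a + pvInt maps c.1 c.2) 0])) st)
    ((PySem.Set.empty : PySem.Set (Int × Int)), ([] : List Int))
  match st.2 with
  | [] => [-1]
  | _ :: _ => PySem.List.sorted st.2 (fun x => x) false

-- ===== PRECONDITION & SPEC =====
-- Pre_ excludes exactly the inputs on which Python A raises: the empty list (maps[0] IndexError),
-- a row shorter than the first row (IndexError while scanning), and a non-digit, non-'X'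
-- character in the first len(maps[0]) columns (ValueError from int()).
def Pre_solution (maps : List String) : Prop :=
  maps ≠ [] ∧ ∀ s ∈ maps, (maps.headD "").toList.length ≤ s.toList.length ∧
    ((s.toList.take (maps.headD "").toList.length).all
      (fun c => c == 'X' || ('0' ≤ c && c ≤ '9'))) = true
instance (maps : List String) : Decidable (Pre_solution maps) := by
  unfold Pre_solution; infer_instance
def pvWitness_solution : List String := ["X9", "11"]
def Spec_solution (maps : List String) (out : List Int) : Prop := out = solution_alt maps
instance (maps : List String) (out : List Int) : Decidable (Spec_solution maps out) := by
  unfold Spec_solution; infer_instance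

-- ===== CLAIM (what is proved, stated in full; the proofs are below) =====
def Claim_equal_solution : Prop :=
  ∀ (maps : List String), Dom_solution maps → Pre_solution maps →
    Spec_solution maps (solution maps)

-- ===== LEMMAS AND PROOFS =====

-- abbreviations for the grid parameters
def pvM (maps : List String) : Int := PySem.Str.len (PySem.List.pyGetD maps 0 "")

def pvLandB (maps : List String) (c : Int × Int) : Bool :=
  decide (0 ≤ c.1 ∧ c.1 < (maps.length : Int) ∧ 0 ≤ c.2 ∧ c.2 < pvM maps ∧
          pvCh maps c.1 c.2 ≠ 'X')

def pvLandSet (maps : List String) : Finset (Int × Int) :=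
  (((PySem.List.pyRange 0 (maps.length : Int) 1).flatMap (fun i =>
    (PySem.List.pyRange 0 (pvM maps) 1).map (fun j => (i, j)))).toFinset).filter
    (fun c => pvLandB maps c = true)

def pvExpand (maps : List String) (done : Finset (Int × Int)) (K : Finset (Int × Int)) :
    Finset (Int × Int) :=
  K ∪ K.biUnion (fun c =>
    ((pvNbrs c.1 c.2).filter (fun d => pvLandB maps d ∧ d ∉ done)).toFinset)

def pvComp (maps : List String) (done : Finset (Int × Int)) (s : Int × Int) :
    Finset (Int × Int) :=
  (pvExpand maps done)^[(pvLandSet maps).card] {s}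

def pvClosed (maps : List String) (done K : Finset (Int × Int)) : Prop :=
  ∀ c ∈ K, ∀ d ∈ pvNbrs c.1 c.2, pvLandB maps d = true → d ∉ done → d ∈ K

-- visited-matrix abstraction
def pvRepr (maps : List String) (v : List (List Bool)) (F : Finset (Int × Int)) : Prop :=
  v.length = maps.length ∧ (∀ r ∈ v, r.length = (pvM maps).toNat) ∧
  ∀ c : Int × Int, 0 ≤ c.1 → 0 ≤ c.2 → (pvGetV v c.1 c.2 = true ↔ c ∈ F)

lemma pvSubset_expand (maps : List String) (done K : Finset (Int × Int)) :
    K ⊆ pvExpand maps done K := Finset.subset_union_left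

lemma pvMem_expand (maps : List String) (done K : Finset (Int × Int)) (d : Int × Int) :
    d ∈ pvExpand maps done K ↔
      d ∈ K ∨ ∃ c ∈ K, d ∈ pvNbrs c.1 c.2 ∧ pvLandB maps d = true ∧ d ∉ done := by
  unfold pvExpand
  simp [Finset.mem_union, Finset.mem_biUnion]

lemma pvExpand_subset_of_closed (maps : List String) (done K M : Finset (Int × Int))
    (hKM : K ⊆ M) (hM : pvClosed maps done M) : pvExpand maps done K ⊆ M := by
  intro d hd
  rcases (pvMem_expand maps done K d).1 hd with h | ⟨c, hc, hnb, hland, hdone⟩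
  · exact hKM h
  · exact hM c (hKM hc) d hnb hland hdone

lemma pvLand_mem_landSet (maps : List String) (c : Int × Int)
    (h : pvLandB maps c = true) : c ∈ pvLandSet maps := by
  have hb := of_decide_eq_true h
  unfold pvLandSet
  refine Finset.mem_filter.2 ⟨?_, by simpa using h⟩
  simp only [List.mem_toFinset, List.mem_flatMap, List.mem_map, PySem.List.mem_pyRange_one]
  exact ⟨c.1, ⟨hb.1, hb.2.1⟩, c.2, ⟨hb.2.2.1, hb.2.2.2.1⟩, by simp⟩

lemma pvIter_fix {α : Type} [DecidableEq α] (f : Finset α → Finset α) (T : Finset α)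
    (hinfl : ∀ K, K ⊆ f K) (hT : ∀ K, K ⊆ T → f K ⊆ T) (x : Finset α) (hx : x ⊆ T)
    (hxne : x.Nonempty) : f (f^[T.card] x) = f^[T.card] x := by
  have hsubT : ∀ k, f^[k] x ⊆ T := by
    intro k
    induction k with
    | zero => simpa using hx
    | succ k ih => rw [Function.iterate_succ_apply']; exact hT _ ih
  by_cases hex : ∃ j, j < T.card ∧ f (f^[j] x) = f^[j] x
  · rcases hex with ⟨j, hj, hfix⟩
    have aux : ∀ d, f (f^[j + d] x) = f^[j + d] x := by
      intro d
      induction d with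
      | zero => simpa using hfix
      | succ d ih =>
        have h1 : j + (d + 1) = (j + d) + 1 := by omega
        rw [h1, Function.iterate_succ_apply', ih, ih]
    have hd : T.card = j + (T.card - j) := by omega
    rw [hd]
    exact aux _
  · rw [not_exists] at hex
    have hex' : ∀ j, j < T.card → f (f^[j] x) ≠ f^[j] x := by
      intro j hj
      have := hex j
      rw [not_and] at this
      exact this hj
    have grow : ∀ k, k ≤ T.card → x.card + k ≤ (f^[k] x).card := by
      intro k
      induction k with
      | zero => simp
      | succ k ih =>
        intro hk
        have h1 := ih (by omega)
        have hne := hex' k (by omega)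
        have hss : f^[k] x ⊂ f (f^[k] x) :=
          HasSubset.Subset.ssubset_of_ne (hinfl _) (fun he => hne he.symm)
        have h2 := Finset.card_lt_card hss
        rw [Function.iterate_succ_apply']
        omega
    have h1 := grow T.card le_rfl
    have h2 := Finset.card_le_card (hsubT T.card)
    have h3 : 1 ≤ x.card := Finset.card_pos.2 hxne
    omega

lemma pvMem_comp_self (maps : List String) (done : Finset (Int × Int)) (s : Int × Int) :
    s ∈ pvComp maps done s := by
  have h : ∀ k : Nat, s ∈ (pvExpand maps done)^[k] {s} := by
    intro k
    induction k with
    | zero => simp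
    | succ k ih =>
      rw [Function.iterate_succ_apply']
      exact pvSubset_expand maps done _ ih
  exact h _

lemma pvComp_subset_land (maps : List String) (done : Finset (Int × Int)) (s : Int × Int)
    (hs : pvLandB maps s = true) : pvComp maps done s ⊆ pvLandSet maps := by
  have hsL : s ∈ pvLandSet maps := pvLand_mem_landSet maps s hs
  have h : ∀ k : Nat, (pvExpand maps done)^[k] {s} ⊆ pvLandSet maps := by
    intro k
    induction k with
    | zero => simpa using hsL
    | succ k ih =>
      rw [Function.iterate_succ_apply']
      intro d hd
      rcases (pvMem_expand maps done _ d).1 hd with h | ⟨c, _, _, hland, _⟩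
      · exact ih h
      · exact pvLand_mem_landSet maps d hland
  exact h _

lemma pvComp_fix (maps : List String) (done : Finset (Int × Int)) (s : Int × Int)
    (hs : pvLandB maps s = true) :
    pvExpand maps done (pvComp maps done s) = pvComp maps done s := by
  have hb := of_decide_eq_true hs
  exact pvIter_fix (pvExpand maps done) (pvLandSet maps)
    (pvSubset_expand maps done)
    (fun K hK => by
      intro d hd
      rcases (pvMem_expand maps done K d).1 hd with h | ⟨c, _, _, hland, _⟩
      · exact hK h
      · exact pvLand_mem_landSet maps d hland)
    {s} (by simpa using pvLand_mem_landSet maps s hs) ⟨s, by simp⟩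

lemma pvComp_min (maps : List String) (done M : Finset (Int × Int)) (s : Int × Int)
    (hsM : s ∈ M) (hM : pvClosed maps done M) : pvComp maps done s ⊆ M := by
  have h : ∀ k : Nat, (pvExpand maps done)^[k] {s} ⊆ M := by
    intro k
    induction k with
    | zero => simpa using hsM
    | succ k ih =>
      rw [Function.iterate_succ_apply']
      exact pvExpand_subset_of_closed maps done _ M ih hM
  exact h _

lemma pvLandSet_card (maps : List String) :
    (pvLandSet maps).card ≤ ((maps.length : Int) * pvM maps).toNat := by
  unfold pvLandSet
  refine le_trans (Finset.card_filter_le _ _) (le_trans (List.toFinset_card_le _) ?_)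
  rw [List.length_flatMap]
  have h1 : ∀ i ∈ PySem.List.pyRange 0 ((maps.length : Int)) 1,
      ((PySem.List.pyRange 0 (pvM maps) 1).map (fun j => (i, j))).length
        = (pvM maps).toNat := by
    intro i _
    simp [PySem.List.length_pyRange_one]
  rw [List.map_congr_left h1, List.map_const', List.sum_replicate, smul_eq_mul,
    PySem.List.length_pyRange_one]
  have hm : 0 ≤ pvM maps := by
    unfold pvM
    rw [PySem.Str.len_eq]
    positivity
  have key : ((maps.length : Int) * pvM maps).toNat = maps.length * (pvM maps).toNat := by
    rcases Int.eq_ofNat_of_zero_le hm with ⟨t, ht⟩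
    rw [ht, ← Nat.cast_mul, Int.toNat_natCast, Int.toNat_natCast]
  rw [key]
  simp


-- reading and writing the visited matrix
lemma pvGetD_int {α : Type} (xs : List α) (i : Int) (d : α) (h : 0 ≤ i) :
    PySem.List.pyGetD xs i d = if h2 : i.toNat < xs.length then xs[i.toNat] else d := by
  split
  · exact PySem.List.pyGetD_eq_getElem xs d h (by omega)
  · apply PySem.List.pyGetD_of_none
    rw [PySem.List.pyGet?_eq_none_iff]
    intro hr
    unfold PySem.Raise.InRange at hr
    omega

lemma pvGetV_setV (maps : List String) (v : List (List Bool)) (x y a b : Int)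
    (hx : 0 ≤ x) (hxn : (x : Int) < v.length) (hy : 0 ≤ y)
    (hym : y < ((PySem.List.pyGetD v x []).length : Int))
    (ha : 0 ≤ a) (hb : 0 ≤ b) :
    pvGetV (pvSetV v x y) a b = if (a, b) = (x, y) then true else pvGetV v a b := by
  unfold pvGetV pvSetV
  have hxe : x = ((x.toNat : Nat) : Int) := by omega
  have hae : a = ((a.toNat : Nat) : Int) := by omega
  have hye : y = ((y.toNat : Nat) : Int) := by omega
  have hbe : b = ((b.toNat : Nat) : Int) := by omega
  rw [hxe, hae, hye, hbe]
  rw [PySem.List.pyGetD_pySetD_natCast v x.toNat a.toNat _ [] (by omega)]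
  by_cases hax : a.toNat = x.toNat
  · rw [if_pos hax, hax]
    rw [PySem.List.pyGetD_pySetD_natCast _ y.toNat b.toNat true false (by rw [← hxe]; omega)]
    by_cases hby : b.toNat = y.toNat
    · rw [if_pos hby, if_pos (by simp [Prod.ext_iff]; omega)]
    · rw [if_neg hby, if_neg (by simp [Prod.ext_iff]; omega)]
  · rw [if_neg hax, if_neg (by simp [Prod.ext_iff]; omega)]

lemma pvRepr_insert (maps : List String) (v : List (List Bool)) (F : Finset (Int × Int))
    (x y : Int) (hx : 0 ≤ x) (hxn : x < (maps.length : Int)) (hy : 0 ≤ y)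
    (hym : y < pvM maps) (h : pvRepr maps v F) :
    pvRepr maps (pvSetV v x y) (insert (x, y) F) := by
  obtain ⟨hlen, hrows, hmem⟩ := h
  have hxv : x < (v.length : Int) := by rw [hlen]; exact hxn
  have hrow : (PySem.List.pyGetD v x []).length = (pvM maps).toNat := by
    apply hrows
    apply PySem.List.pyGetD_mem
    unfold PySem.Raise.InRange
    omega
  have hymr : y < ((PySem.List.pyGetD v x []).length : Int) := by rw [hrow]; omega
  refine ⟨?_, ?_, ?_⟩
  · unfold pvSetV; rw [PySem.List.length_pySetD]; exact hlen
  · intro r hr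
    unfold pvSetV at hr
    have hxe : x = ((x.toNat : Nat) : Int) := by omega
    rw [hxe, PySem.List.pySetD_natCast] at hr
    rcases List.mem_or_eq_of_mem_set hr with h1 | h1
    · exact hrows r h1
    · rw [h1]
      rw [PySem.List.length_pySetD, ← hxe]
      exact hrow
  · intro c hc1 hc2
    rw [pvGetV_setV maps v x y c.1 c.2 hx hxv hy hymr hc1 hc2]
    by_cases hcx : (c.1, c.2) = (x, y)
    · simp only [if_pos hcx]
      have : c = (x, y) := by rw [← hcx]
      simp [this]
    · rw [if_neg hcx]
      rw [hmem c hc1 hc2]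
      have : c ≠ (x, y) := by
        intro he; exact hcx (by rw [he])
      simp [Finset.mem_insert, this]

lemma pvRepr_read (maps : List String) (v : List (List Bool)) (F : Finset (Int × Int))
    (h : pvRepr maps v F) (c : Int × Int) (hc1 : 0 ≤ c.1) (hc2 : 0 ≤ c.2) :
    pvGetV v c.1 c.2 = false ↔ c ∉ F := by
  rw [← h.2.2 c hc1 hc2]
  simp

lemma pvRepr_init (maps : List String) :
    pvRepr maps ((PySem.List.pyRange 0 (maps.length : Int) 1).map
      (fun _ => List.replicate (pvM maps).toNat false)) ∅ := by
  refine ⟨?_, ?_, ?_⟩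
  · simp [PySem.List.length_pyRange_one]
  · intro r hr
    rcases List.mem_map.1 hr with ⟨i, _, rfl⟩
    simp
  · intro c hc1 hc2
    simp only [Finset.notMem_empty, iff_false]
    unfold pvGetV
    rw [pvGetD_int _ _ _ hc1]
    split
    · rename_i hlt
      rw [List.getElem_map, pvGetD_int _ _ _ hc2]
      split
      · simp
      · simp
    · rw [Bool.not_eq_true]
      apply PySem.List.pyGetD_of_none
      rw [PySem.List.pyGet?_eq_none_iff]
      unfold PySem.Raise.InRange
      simp only [List.length_nil, Nat.cast_zero]
      omega


lemma pvNbrs_mem_of_dir (x d : Int × Int) (hd : d ∈ pvDirs) :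
    (x.1 + d.1, x.2 + d.2) ∈ pvNbrs x.1 x.2 := by
  fin_cases hd <;> simp [pvNbrs, Prod.ext_iff] <;> omega

lemma pvNbrs_cases (x : Int × Int) (nb : Int × Int) (h : nb ∈ pvNbrs x.1 x.2) :
    ∃ d ∈ pvDirs, nb = (x.1 + d.1, x.2 + d.2) := by
  simp only [pvNbrs, List.mem_cons, List.not_mem_nil, or_false] at h
  rcases h with h | h | h | h
  · exact ⟨(-1, 0), by simp [pvDirs], by rw [h, Prod.mk.injEq]; omega⟩
  · exact ⟨(1, 0), by simp [pvDirs], by rw [h, Prod.mk.injEq]; omega⟩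
  · exact ⟨(0, -1), by simp [pvDirs], by rw [h, Prod.mk.injEq]; omega⟩
  · exact ⟨(0, 1), by simp [pvDirs], by rw [h, Prod.mk.injEq]; omega⟩

lemma pvFillA_dirs (maps : List String) (done : Finset (Int × Int)) (s x : Int × Int)
    (hs : pvLandB maps s = true) (hx : x ∈ pvComp maps done s) :
    ∀ (ds : List (Int × Int)), ∀ (v : List (List Bool)) (stk : List (Int × Int))
      (M : Finset (Int × Int)),
      (∀ d ∈ ds, (x.1 + d.1, x.2 + d.2) ∈ pvNbrs x.1 x.2) →
      pvRepr maps v (done ∪ M) → stk.Nodup → (∀ c ∈ stk, c ∈ M) →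
      M ⊆ pvComp maps done s →
      ∃ M' new v',
        ds.foldl (pvStepA maps (maps.length : Int) (pvM maps) x.1 x.2) (v, stk)
          = (v', stk ++ new) ∧
        pvRepr maps v' (done ∪ M') ∧
        M' = M ∪ new.toFinset ∧
        M' ⊆ pvComp maps done s ∧
        (stk ++ new).Nodup ∧
        (∀ c ∈ stk ++ new, c ∈ M') ∧
        (∀ c ∈ new, c ∉ M) ∧
        (pvComp maps done s \ M').card + (stk ++ new).length
          ≤ (pvComp maps done s \ M).card + stk.length ∧
        (∀ d ∈ ds, pvLandB maps (x.1 + d.1, x.2 + d.2) = true →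
          (x.1 + d.1, x.2 + d.2) ∉ done → (x.1 + d.1, x.2 + d.2) ∈ M') := by
  intro ds
  induction ds with
  | nil =>
    intro v stk M _ hrepr hnd hsub hMC
    exact ⟨M, [], v, by simp, by simpa using hrepr, by simp, hMC, by simpa using hnd,
      by simpa using hsub, by simp, by simp, by simp⟩
  | cons d ds ih =>
    intro v stk M hds hrepr hnd hsub hMC
    simp only [List.foldl_cons]
    by_cases hcond : 0 ≤ x.1 + d.1 ∧ x.1 + d.1 < (maps.length : Int) ∧ 0 ≤ x.2 + d.2 ∧
        x.2 + d.2 < pvM maps ∧ pvGetV v (x.1 + d.1) (x.2 + d.2) = false ∧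
        pvCh maps (x.1 + d.1) (x.2 + d.2) ≠ 'X'
    · -- the neighbour is marked and pushed
      obtain ⟨h1, h2, h3, h4, h5, h6⟩ := hcond
      have hstep : pvStepA maps (maps.length : Int) (pvM maps) x.1 x.2 (v, stk) d
          = (pvSetV v (x.1 + d.1) (x.2 + d.2), stk ++ [(x.1 + d.1, x.2 + d.2)]) := by
        unfold pvStepA
        rw [if_pos ⟨h1, h2, h3, h4, h5, h6⟩]
      have hland : pvLandB maps (x.1 + d.1, x.2 + d.2) = true := by
        unfold pvLandB
        rw [decide_eq_true_iff]
        exact ⟨h1, h2, h3, h4, h6⟩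
      have hnotin : (x.1 + d.1, x.2 + d.2) ∉ done ∪ M :=
        (pvRepr_read maps v (done ∪ M) hrepr (x.1 + d.1, x.2 + d.2) h1 h3).1 h5
      have hnd2 : (x.1 + d.1, x.2 + d.2) ∉ done := fun hmem => hnotin (Finset.mem_union_left _ hmem)
      have hnM : (x.1 + d.1, x.2 + d.2) ∉ M := fun hmem => hnotin (Finset.mem_union_right _ hmem)
      have hncC : (x.1 + d.1, x.2 + d.2) ∈ pvComp maps done s := by
        rw [← pvComp_fix maps done s hs]
        exact (pvMem_expand maps done _ _).2
          (Or.inr ⟨x, hx, hds d (by simp), hland, hnd2⟩)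
      have hrepr2 : pvRepr maps (pvSetV v (x.1 + d.1) (x.2 + d.2))
          (done ∪ insert (x.1 + d.1, x.2 + d.2) M) := by
        rw [Finset.union_insert]
        exact pvRepr_insert maps v (done ∪ M) _ _ h1 h2 h3 h4 hrepr
      have hnotstk : (x.1 + d.1, x.2 + d.2) ∉ stk := fun hmem => hnM (hsub _ hmem)
      obtain ⟨M', new, v', heq, hrepr', hM'eq, hM'C, hnd', hsub', hnewM, hcard, hproc⟩ :=
        ih (pvSetV v (x.1 + d.1) (x.2 + d.2)) (stk ++ [(x.1 + d.1, x.2 + d.2)])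
          (insert (x.1 + d.1, x.2 + d.2) M)
          (fun d' hd' => hds d' (by simp [hd']))
          hrepr2
          (by
            rw [List.nodup_append]
            refine ⟨hnd, by simp, ?_⟩
            intro a ha b hb
            simp only [List.mem_singleton] at hb
            subst hb
            intro he
            rw [he] at ha
            exact hnotstk ha)
          (by intro c hc
              rcases List.mem_append.1 hc with h | h
              · exact Finset.mem_insert_of_mem (hsub c h)
              · simp at h; simp [h])
          (Finset.insert_subset hncC hMC)
      refine ⟨M', (x.1 + d.1, x.2 + d.2) :: new, v', ?_, hrepr', ?_, hM'C, ?_, ?_, ?_, ?_, ?_⟩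
      · rw [hstep, heq, List.append_assoc]
        rfl
      · rw [hM'eq]
        ext c
        by_cases hc : c = (x.1 + d.1, x.2 + d.2) <;>
          simp [Finset.mem_insert, hc]
      · simpa [List.append_assoc] using hnd'
      · intro c hc
        apply hsub'
        simpa [List.append_assoc] using hc
      · intro c hc
        rcases List.mem_cons.1 hc with rfl | hc2
        · exact hnM
        · intro hcM
          exact hnewM c hc2 (Finset.mem_insert_of_mem hcM)
      · have hsd : pvComp maps done s \ insert (x.1 + d.1, x.2 + d.2) M
            = (pvComp maps done s \ M).erase (x.1 + d.1, x.2 + d.2) := by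
          ext c
          by_cases hc : c = (x.1 + d.1, x.2 + d.2) <;>
            simp [Finset.mem_erase, Finset.mem_sdiff, Finset.mem_insert, hc]
        have hmemCM : (x.1 + d.1, x.2 + d.2) ∈ pvComp maps done s \ M :=
          Finset.mem_sdiff.2 ⟨hncC, hnM⟩
        have hpos : 1 ≤ (pvComp maps done s \ M).card :=
          Finset.card_pos.2 ⟨_, hmemCM⟩
        have hce := Finset.card_erase_of_mem hmemCM
        rw [hsd, hce] at hcard
        simp only [List.length_append, List.length_cons, List.length_singleton] at hcard ⊢
        omega
      · intro d' hd' hl' hnd'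
        rcases List.mem_cons.1 hd' with rfl | hd2
        · rw [hM'eq]
          exact Finset.mem_union_left _ (Finset.mem_insert_self _ _)
        · exact hproc d' hd2 hl' hnd'
    · -- nothing happens for this direction
      have hstep : pvStepA maps (maps.length : Int) (pvM maps) x.1 x.2 (v, stk) d = (v, stk) := by
        unfold pvStepA
        rw [if_neg hcond]
      rw [hstep]
      obtain ⟨M', new, v', heq, hrepr', hM'eq, hM'C, hnd', hsub', hnewM, hcard, hproc⟩ :=
        ih v stk M (fun d' hd' => hds d' (by simp [hd'])) hrepr hnd hsub hMC
      refine ⟨M', new, v', heq, hrepr', hM'eq, hM'C, hnd', hsub', hnewM, hcard, ?_⟩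
      intro d' hd' hl' hdone'
      rcases List.mem_cons.1 hd' with rfl | hd2
      · -- the guard failed although the cell is land and unblocked: it was already visited
        have hb := of_decide_eq_true hl'
        have hvis : pvGetV v (x.1 + d'.1) (x.2 + d'.2) = true := by
          by_contra hf
          rw [Bool.not_eq_true] at hf
          exact hcond ⟨hb.1, hb.2.1, hb.2.2.1, hb.2.2.2.1, hf, hb.2.2.2.2⟩
        have := (hrepr.2.2 (x.1 + d'.1, x.2 + d'.2) hb.1 hb.2.2.1).1 hvis
        rcases Finset.mem_union.1 this with h | h
        · exact absurd h hdone'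
        · rw [hM'eq]
          exact Finset.mem_union_left _ h
      · exact hproc d' hd2 hl' hdone'

lemma pvFillA_go (maps : List String) (done : Finset (Int × Int)) (s : Int × Int)
    (hs : pvLandB maps s = true) :
    ∀ (fuel : Nat), ∀ (v : List (List Bool)) (stk : List (Int × Int)) (total base : Int)
      (M : Finset (Int × Int)),
      pvRepr maps v (done ∪ M) → stk.Nodup → (∀ c ∈ stk, c ∈ M) → s ∈ M →
      M ⊆ pvComp maps done s →
      (∀ c ∈ M, c ∉ stk → ∀ nb ∈ pvNbrs c.1 c.2, pvLandB maps nb = true → nb ∉ done → nb ∈ M) →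
      total = base + ∑ c ∈ M \ stk.toFinset, pvInt maps c.1 c.2 →
      (pvComp maps done s \ M).card + stk.length < fuel →
      pvRepr maps (pvFillA maps (maps.length : Int) (pvM maps) fuel v stk total).1
          (done ∪ pvComp maps done s) ∧
        (pvFillA maps (maps.length : Int) (pvM maps) fuel v stk total).2
          = base + ∑ c ∈ pvComp maps done s, pvInt maps c.1 c.2 := by
  intro fuel
  induction fuel with
  | zero =>
    intro v stk total base M _ _ _ _ _ _ _ hfuel
    omega
  | succ fuel ih =>
    intro v stk total base M hrepr hnd hsub hsM hMC hcl htot hfuel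
    rcases List.eq_nil_or_concat stk with rfl | ⟨rest, x, hconcat⟩
    · -- stack exhausted: M is the whole component
      have hclosed : pvClosed maps done M := by
        intro c hc nb hnb hl hd
        exact hcl c hc (by simp) nb hnb hl hd
      have hCM : pvComp maps done s ⊆ M := pvComp_min maps done M s hsM hclosed
      have hEq : M = pvComp maps done s := Finset.Subset.antisymm hMC hCM
      have hpop : PySem.List.pop? ([] : List (Int × Int)) (-1) = none := rfl
      rw [show pvFillA maps (maps.length : Int) (pvM maps) (fuel + 1) v [] total = (v, total) by
        simp [pvFillA, hpop]]
      constructor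
      · rw [← hEq]; exact hrepr
      · rw [htot, ← hEq]; simp
    · -- pop the top of the stack
      rw [List.concat_eq_append] at hconcat
      subst hconcat
      obtain ⟨x1, x2⟩ := x
      have hx : (x1, x2) ∈ M := hsub _ (by simp)
      have hxC : (x1, x2) ∈ pvComp maps done s := hMC hx
      have hxrest : (x1, x2) ∉ rest := fun hmem =>
        (List.nodup_append.1 hnd).2.2 (x1, x2) hmem (x1, x2) (by simp) rfl
      obtain ⟨M', new, v', heq, hrepr', hM'eq, hM'C, hnd', hsub', hnewM, hcard, hproc⟩ :=
        pvFillA_dirs maps done s (x1, x2) hs hxC pvDirs v rest M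
          (fun d hd => pvNbrs_mem_of_dir (x1, x2) d hd)
          hrepr ((List.nodup_append.1 hnd).1) (fun c hc => hsub c (by simp [hc])) hMC
      have hMM' : M ⊆ M' := by rw [hM'eq]; exact Finset.subset_union_left
      rw [show pvFillA maps (maps.length : Int) (pvM maps) (fuel + 1) v (rest ++ [(x1, x2)]) total
          = pvFillA maps (maps.length : Int) (pvM maps) fuel
              (pvDirs.foldl (pvStepA maps (maps.length : Int) (pvM maps) x1 x2) (v, rest)).1
              (pvDirs.foldl (pvStepA maps (maps.length : Int) (pvM maps) x1 x2) (v, rest)).2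
              (total + pvInt maps x1 x2) by
        simp [pvFillA, PySem.List.pop?_last]]
      rw [heq]
      apply ih v' (rest ++ new) (total + pvInt maps x1 x2) base M' hrepr' hnd' hsub'
        (hMM' hsM) hM'C
      · -- closure invariant
        intro c hc hcn nb hnb hl hd
        rw [hM'eq] at hc
        rcases Finset.mem_union.1 hc with hcM | hcnew
        · by_cases hcx : c = (x1, x2)
          · subst hcx
            obtain ⟨d, hdmem, rfl⟩ := pvNbrs_cases (x1, x2) nb hnb
            exact hproc d hdmem hl hd
          · have hcstk : c ∉ rest ++ [(x1, x2)] := by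
              intro hmem
              rcases List.mem_append.1 hmem with h | h
              · exact hcn (List.mem_append.2 (Or.inl h))
              · simp at h; exact hcx h
            exact hMM' (hcl c hcM hcstk nb hnb hl hd)
        · exact absurd (List.mem_append.2 (Or.inr (List.mem_toFinset.1 hcnew))) hcn
      · -- the running total counts exactly the popped cells
        have hxnew : (x1, x2) ∉ new := fun hmem => hnewM _ hmem hx
        have hset : M' \ (rest ++ new).toFinset
            = insert (x1, x2) (M \ (rest ++ [(x1, x2)]).toFinset) := by
          rw [hM'eq]
          ext c
          simp only [Finset.mem_sdiff, Finset.mem_union, Finset.mem_insert,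
            List.mem_toFinset, List.mem_append, List.mem_singleton]
          constructor
          · rintro ⟨hcm, hcn⟩
            have hnr : c ∉ rest := fun h => hcn (Or.inl h)
            have hnn : c ∉ new := fun h => hcn (Or.inr h)
            rcases hcm with hcm | hcm
            · by_cases hcx : c = (x1, x2)
              · exact Or.inl hcx
              · exact Or.inr ⟨hcm, fun h => h.elim hnr hcx⟩
            · exact absurd hcm hnn
          · rintro (rfl | ⟨hcm, hcn⟩)
            · exact ⟨Or.inl hx, fun h => h.elim hxrest hxnew⟩
            · refine ⟨Or.inl hcm, fun h => ?_⟩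
              rcases h with h | h
              · exact hcn (Or.inl h)
              · exact hnewM c h hcm
        have hxnot : (x1, x2) ∉ M \ (rest ++ [(x1, x2)]).toFinset := by simp
        rw [hset, Finset.sum_insert hxnot, htot]
        ring
      · -- fuel bound
        simp only [List.length_append, List.length_singleton] at hfuel hcard ⊢
        omega


lemma pvContains_false {s : PySem.Set (Int × Int)} {x : Int × Int}
    (h : PySem.Set.contains s x = false) : x ∉ s := by
  intro hmem
  rw [← PySem.Set.contains_iff] at hmem
  rw [h] at hmem
  exact Bool.false_ne_true hmem

lemma pvContains_of_not_mem {s : PySem.Set (Int × Int)} {x : Int × Int}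
    (h : x ∉ s) : PySem.Set.contains s x = false := by
  by_contra hne
  rw [Bool.not_eq_false, PySem.Set.contains_iff] at hne
  exact h hne

lemma pvGrowB_cell (maps : List String) (done : Finset (Int × Int)) (s : Int × Int)
    (seen : PySem.Set (Int × Int)) (hseen : ∀ c : Int × Int, c ∈ seen ↔ c ∈ done)
    (hs : pvLandB maps s = true) (x : Int × Int) (hx : x ∈ pvComp maps done s) :
    ∀ (ds : List (Int × Int)), ∀ (comp : PySem.Set (Int × Int)) (nxt : List (Int × Int)),
      (∀ d ∈ ds, d ∈ pvNbrs x.1 x.2) → comp.Nodup →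
      comp.toFinset ⊆ pvComp maps done s →
      ∃ new,
        ds.foldl (pvStepB maps (maps.length : Int) (pvM maps) seen) (comp, nxt)
          = (comp ++ new, nxt ++ new) ∧
        (comp ++ new).Nodup ∧
        (comp ++ new).toFinset ⊆ pvComp maps done s ∧
        (∀ c ∈ new, c ∉ comp) ∧
        (∀ d ∈ ds, pvLandB maps d = true → d ∉ done → d ∈ (comp ++ new).toFinset) := by
  intro ds
  induction ds with
  | nil =>
    intro comp nxt _ hnd hsub
    exact ⟨[], by simp, by simpa using hnd, by simpa using hsub, by simp, by simp⟩
  | cons d ds ih =>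
    intro comp nxt hds hnd hsub
    simp only [List.foldl_cons]
    by_cases hcond : 0 ≤ d.1 ∧ d.1 < (maps.length : Int) ∧ 0 ≤ d.2 ∧ d.2 < pvM maps ∧
        pvCh maps d.1 d.2 ≠ 'X' ∧ PySem.Set.contains comp d = false ∧
        PySem.Set.contains seen d = false
    · obtain ⟨h1, h2, h3, h4, h5, h6, h7⟩ := hcond
      have hdin : d ∉ comp := pvContains_false h6
      have hadd : PySem.Set.add comp d = comp ++ [d] := by
        unfold PySem.Set.add
        rw [h6]
        simp
      have hstep : pvStepB maps (maps.length : Int) (pvM maps) seen (comp, nxt) d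
          = (comp ++ [d], nxt ++ [d]) := by
        unfold pvStepB
        rw [if_pos ⟨h1, h2, h3, h4, h5, h6, h7⟩]
        rw [hadd]
      have hland : pvLandB maps d = true := by
        unfold pvLandB
        rw [decide_eq_true_iff]
        exact ⟨h1, h2, h3, h4, h5⟩
      have hdone : d ∉ done := fun hmem => (pvContains_false h7) ((hseen d).2 hmem)
      have hdC : d ∈ pvComp maps done s := by
        rw [← pvComp_fix maps done s hs]
        exact (pvMem_expand maps done _ _).2 (Or.inr ⟨x, hx, hds d (by simp), hland, hdone⟩)
      obtain ⟨new', heq, hnd', hsub', hnew', hproc'⟩ :=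
        ih (comp ++ [d]) (nxt ++ [d]) (fun d' hd' => hds d' (by simp [hd']))
          (by rw [List.nodup_append]
              exact ⟨hnd, by simp, by
                intro a ha b hb
                simp only [List.mem_singleton] at hb
                subst hb
                intro he
                rw [he] at ha
                exact hdin ha⟩)
          (by intro c hc
              rcases List.mem_toFinset.1 hc |> List.mem_append.1 with h | h
              · exact hsub (List.mem_toFinset.2 h)
              · simp at h; rw [h]; exact hdC)
      refine ⟨d :: new', ?_, ?_, ?_, ?_, ?_⟩
      · rw [hstep, heq]
        simp [List.append_assoc]
      · simpa [List.append_assoc] using hnd'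
      · intro c hc
        apply hsub'
        simpa [List.append_assoc] using hc
      · intro c hc
        rcases List.mem_cons.1 hc with rfl | hc2
        · exact hdin
        · intro hcc
          exact hnew' c hc2 (List.mem_append.2 (Or.inl hcc))
      · intro d' hd' hl' hdone'
        rcases List.mem_cons.1 hd' with rfl | hd2
        · apply List.mem_toFinset.2
          rw [show comp ++ d' :: new' = (comp ++ [d']) ++ new' by simp]
          exact List.mem_append.2 (Or.inl (by simp))
        · have := hproc' d' hd2 hl' hdone'
          simpa [List.append_assoc] using this
    · have hstep : pvStepB maps (maps.length : Int) (pvM maps) seen (comp, nxt) d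
          = (comp, nxt) := by
        unfold pvStepB
        rw [if_neg hcond]
      rw [hstep]
      obtain ⟨new', heq, hnd', hsub', hnew', hproc'⟩ :=
        ih comp nxt (fun d' hd' => hds d' (by simp [hd'])) hnd hsub
      refine ⟨new', heq, hnd', hsub', hnew', ?_⟩
      intro d' hd' hl' hdone'
      rcases List.mem_cons.1 hd' with rfl | hd2
      · have hb := of_decide_eq_true hl'
        have hseenF : PySem.Set.contains seen d' = false :=
          pvContains_of_not_mem (fun hmem => hdone' ((hseen d').1 hmem))
        have hcomp : PySem.Set.contains comp d' = true := by
          by_contra hf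
          rw [Bool.not_eq_true] at hf
          exact hcond ⟨hb.1, hb.2.1, hb.2.2.1, hb.2.2.2.1, hb.2.2.2.2, hf, hseenF⟩
        have : d' ∈ comp := (PySem.Set.contains_iff comp d').1 hcomp
        exact List.mem_toFinset.2 (List.mem_append.2 (Or.inl this))
      · exact hproc' d' hd2 hl' hdone'

lemma pvGrowB_front (maps : List String) (done : Finset (Int × Int)) (s : Int × Int)
    (seen : PySem.Set (Int × Int)) (hseen : ∀ c : Int × Int, c ∈ seen ↔ c ∈ done)
    (hs : pvLandB maps s = true) :
    ∀ (fr : List (Int × Int)), ∀ (comp : PySem.Set (Int × Int)) (nxt : List (Int × Int)),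
      (∀ c ∈ fr, c ∈ comp.toFinset) → comp.Nodup →
      comp.toFinset ⊆ pvComp maps done s →
      ∃ new,
        fr.foldl (fun st c => (pvNbrs c.1 c.2).foldl
            (pvStepB maps (maps.length : Int) (pvM maps) seen) st) (comp, nxt)
          = (comp ++ new, nxt ++ new) ∧
        (comp ++ new).Nodup ∧
        (comp ++ new).toFinset ⊆ pvComp maps done s ∧
        (∀ c ∈ new, c ∉ comp) ∧
        (∀ c ∈ fr, ∀ nb ∈ pvNbrs c.1 c.2, pvLandB maps nb = true → nb ∉ done →
          nb ∈ (comp ++ new).toFinset) := by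
  intro fr
  induction fr with
  | nil =>
    intro comp nxt _ hnd hsub
    exact ⟨[], by simp, by simpa using hnd, by simpa using hsub, by simp, by simp⟩
  | cons c fr ih =>
    intro comp nxt hfr hnd hsub
    simp only [List.foldl_cons]
    have hcC : c ∈ pvComp maps done s := hsub (hfr c (by simp))
    obtain ⟨new1, heq1, hnd1, hsub1, hnew1, hproc1⟩ :=
      pvGrowB_cell maps done s seen hseen hs c hcC (pvNbrs c.1 c.2) comp nxt
        (fun d hd => hd) hnd hsub
    rw [heq1]
    obtain ⟨new2, heq2, hnd2, hsub2, hnew2, hproc2⟩ :=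
      ih (comp ++ new1) (nxt ++ new1)
        (fun c' hc' => by
          apply List.mem_toFinset.2
          exact List.mem_append.2 (Or.inl (List.mem_toFinset.1 (hfr c' (by simp [hc'])))))
        hnd1 hsub1
    refine ⟨new1 ++ new2, ?_, ?_, ?_, ?_, ?_⟩
    · rw [heq2]
      simp [List.append_assoc]
    · simpa [List.append_assoc] using hnd2
    · intro c' hc'
      apply hsub2
      simpa [List.append_assoc] using hc'
    · intro c' hc'
      rcases List.mem_append.1 hc' with h | h
      · exact hnew1 c' h
      · intro hcc
        exact hnew2 c' h (List.mem_append.2 (Or.inl hcc))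
    · intro c' hc' nb hnb hl hd
      rcases List.mem_cons.1 hc' with rfl | hc2
      · have := hproc1 nb hnb hl hd
        apply List.mem_toFinset.2
        rw [← List.append_assoc]
        exact List.mem_append.2 (Or.inl (List.mem_toFinset.1 this))
      · have := hproc2 c' hc2 nb hnb hl hd
        simpa [List.append_assoc] using this

lemma pvGrowB_go (maps : List String) (done : Finset (Int × Int)) (s : Int × Int)
    (seen : PySem.Set (Int × Int)) (hseen : ∀ c : Int × Int, c ∈ seen ↔ c ∈ done)
    (hs : pvLandB maps s = true) :
    ∀ (fuel : Nat), ∀ (frontier : List (Int × Int)) (comp : PySem.Set (Int × Int)),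
      comp.Nodup → (∀ c ∈ frontier, c ∈ comp.toFinset) → s ∈ comp.toFinset →
      comp.toFinset ⊆ pvComp maps done s →
      (∀ c ∈ comp.toFinset, c ∉ frontier → ∀ nb ∈ pvNbrs c.1 c.2,
        pvLandB maps nb = true → nb ∉ done → nb ∈ comp.toFinset) →
      (pvComp maps done s \ comp.toFinset).card + 2 ≤ fuel →
      (pvGrowB maps (maps.length : Int) (pvM maps) seen fuel frontier comp).toFinset
          = pvComp maps done s ∧
        (pvGrowB maps (maps.length : Int) (pvM maps) seen fuel frontier comp).Nodup := by
  intro fuel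
  induction fuel with
  | zero =>
    intro frontier comp _ _ _ _ _ hfuel
    omega
  | succ fuel ih =>
    intro frontier comp hnd hfr hsM hsub hcl hfuel
    match frontier with
    | [] =>
      have hclosed : pvClosed maps done comp.toFinset := by
        intro c hc nb hnb hl hd
        exact hcl c hc (by simp) nb hnb hl hd
      have hCM : pvComp maps done s ⊆ comp.toFinset :=
        pvComp_min maps done comp.toFinset s hsM hclosed
      have hEq : comp.toFinset = pvComp maps done s := Finset.Subset.antisymm hsub hCM
      exact ⟨by rw [show pvGrowB maps (maps.length : Int) (pvM maps) seen (fuel + 1) [] comp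
          = comp by simp [pvGrowB]]; exact hEq,
        by rw [show pvGrowB maps (maps.length : Int) (pvM maps) seen (fuel + 1) [] comp
          = comp by simp [pvGrowB]]; exact hnd⟩
    | c :: fr =>
      obtain ⟨new, heq, hnd', hsub', hnew', hproc'⟩ :=
        pvGrowB_front maps done s seen hseen hs (c :: fr) comp [] hfr hnd hsub
      have hstep : pvGrowB maps (maps.length : Int) (pvM maps) seen (fuel + 1) (c :: fr) comp
          = pvGrowB maps (maps.length : Int) (pvM maps) seen fuel ([] ++ new) (comp ++ new) := by
        rw [show pvGrowB maps (maps.length : Int) (pvM maps) seen (fuel + 1) (c :: fr) comp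
            = pvGrowB maps (maps.length : Int) (pvM maps) seen fuel
              ((c :: fr).foldl (fun st c => (pvNbrs c.1 c.2).foldl
                (pvStepB maps (maps.length : Int) (pvM maps) seen) st) (comp, [])).2
              ((c :: fr).foldl (fun st c => (pvNbrs c.1 c.2).foldl
                (pvStepB maps (maps.length : Int) (pvM maps) seen) st) (comp, [])).1
          by simp [pvGrowB]]
        rw [heq]
      have hclosure' : ∀ c' ∈ (comp ++ new).toFinset, c' ∉ new →
          ∀ nb ∈ pvNbrs c'.1 c'.2, pvLandB maps nb = true → nb ∉ done →
            nb ∈ (comp ++ new).toFinset := by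
        intro c' hc' hcn nb hnb hl hd
        rcases List.mem_append.1 (List.mem_toFinset.1 hc') with h | h
        · by_cases hcf : c' ∈ c :: fr
          · exact hproc' c' hcf nb hnb hl hd
          · have := hcl c' (List.mem_toFinset.2 h) hcf nb hnb hl hd
            exact List.mem_toFinset.2 (List.mem_append.2 (Or.inl (List.mem_toFinset.1 this)))
        · exact absurd h hcn
      rw [hstep]
      match hnewc : new with
      | [] =>
        have hcomp2 : comp ++ [] = comp := by simp
        rw [hcomp2]
        simp only [List.nil_append]
        have hfuel1 : 1 ≤ fuel := by omega
        obtain ⟨fuel', rfl⟩ : ∃ f, fuel = f + 1 := ⟨fuel - 1, by omega⟩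
        have hclosed : pvClosed maps done comp.toFinset := by
          intro c' hc' nb hnb hl hd
          by_cases hcf : c' ∈ c :: fr
          · have := hproc' c' hcf nb hnb hl hd
            simpa using this
          · exact hcl c' hc' hcf nb hnb hl hd
        have hCM : pvComp maps done s ⊆ comp.toFinset :=
          pvComp_min maps done comp.toFinset s hsM hclosed
        have hEq : comp.toFinset = pvComp maps done s := Finset.Subset.antisymm hsub hCM
        exact ⟨by rw [show pvGrowB maps (maps.length : Int) (pvM maps) seen (fuel' + 1) [] comp
            = comp by simp [pvGrowB]]; exact hEq,
          by rw [show pvGrowB maps (maps.length : Int) (pvM maps) seen (fuel' + 1) [] comp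
            = comp by simp [pvGrowB]]; exact hnd⟩
      | nc :: new' =>
        apply ih ([] ++ (nc :: new')) (comp ++ (nc :: new'))
        · exact hnd'
        · intro c' hc'
          simp only [List.nil_append] at hc'
          exact List.mem_toFinset.2 (List.mem_append.2 (Or.inr hc'))
        · exact List.mem_toFinset.2 (List.mem_append.2 (Or.inl (List.mem_toFinset.1 hsM)))
        · exact hsub'
        · intro c' hc' hcn nb hnb hl hd
          exact hclosure' c' hc' (by simpa using hcn) nb hnb hl hd
        · -- strictly fewer missing cells
          have hssub : pvComp maps done s \ (comp ++ nc :: new').toFinset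
              ⊂ pvComp maps done s \ comp.toFinset := by
            constructor
            · intro c' hc'
              rcases Finset.mem_sdiff.1 hc' with ⟨h1, h2⟩
              refine Finset.mem_sdiff.2 ⟨h1, fun hmem => ?_⟩
              exact h2 (List.mem_toFinset.2
                (List.mem_append.2 (Or.inl (List.mem_toFinset.1 hmem))))
            · intro hsup
              have hncC : nc ∈ pvComp maps done s :=
                hsub' (List.mem_toFinset.2 (List.mem_append.2 (Or.inr (by simp))))
              have hncc : nc ∉ comp := hnew' nc (by simp)
              have h1 : nc ∈ pvComp maps done s \ comp.toFinset :=
                Finset.mem_sdiff.2 ⟨hncC, fun h => hncc (List.mem_toFinset.1 h)⟩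
              have h2 := hsup h1
              rcases Finset.mem_sdiff.1 h2 with ⟨_, h3⟩
              exact h3 (List.mem_toFinset.2 (List.mem_append.2 (Or.inr (by simp))))
          have := Finset.card_lt_card hssub
          omega

lemma pvFoldSum (maps : List String) :
    ∀ (l : List (Int × Int)) (a : Int),
      l.foldl (fun acc c => acc + pvInt maps c.1 c.2) a
        = a + (l.map (fun c => pvInt maps c.1 c.2)).sum := by
  intro l
  induction l with
  | nil => intro a; simp
  | cons c l ih =>
    intro a
    simp only [List.foldl_cons, List.map_cons, List.sum_cons]
    rw [ih]
    ring


def pvCells (maps : List String) : List (Int × Int) :=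
  (PySem.List.pyRange 0 (maps.length : Int) 1).flatMap (fun i =>
    (PySem.List.pyRange 0 (pvM maps) 1).map (fun j => (i, j)))

lemma pvFoldl_flatMap {σ α β : Type} (l : List α) (f : α → List β) (g : σ → β → σ) :
    ∀ init : σ, (l.flatMap f).foldl g init = l.foldl (fun st a => (f a).foldl g st) init := by
  induction l with
  | nil => intro init; simp
  | cons a l ih =>
    intro init
    simp only [List.flatMap_cons, List.foldl_append, List.foldl_cons]
    exact ih _

lemma pvNested {σ : Type} (maps : List String) (g : σ → (Int × Int) → σ) (init : σ) :
    (PySem.List.pyRange 0 (maps.length : Int) 1).foldl (fun st i =>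
      (PySem.List.pyRange 0 (pvM maps) 1).foldl (fun st j => g st (i, j)) st) init
      = (pvCells maps).foldl g init := by
  rw [pvCells, pvFoldl_flatMap]
  simp only [List.foldl_map]

lemma pvCells_bounds (maps : List String) :
    ∀ c ∈ pvCells maps, 0 ≤ c.1 ∧ c.1 < (maps.length : Int) ∧ 0 ≤ c.2 ∧ c.2 < pvM maps := by
  intro c hc
  unfold pvCells at hc
  rcases List.mem_flatMap.1 hc with ⟨i, hi, hc2⟩
  rcases List.mem_map.1 hc2 with ⟨j, hj, rfl⟩
  rw [PySem.List.mem_pyRange_one] at hi hj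
  exact ⟨hi.1, hi.2, hj.1, hj.2⟩

lemma pvCardBound (maps : List String) (done : Finset (Int × Int)) (c : Int × Int)
    (hland : pvLandB maps c = true) :
    (pvComp maps done c \ {c}).card ≤ ((maps.length : Int) * pvM maps).toNat - 1 ∧
      1 ≤ ((maps.length : Int) * pvM maps).toNat := by
  have hb := of_decide_eq_true hland
  have hcL : c ∈ pvLandSet maps := pvLand_mem_landSet maps c hland
  have hsub : pvComp maps done c \ {c} ⊆ (pvLandSet maps).erase c := by
    intro d hd
    rcases Finset.mem_sdiff.1 hd with ⟨h1, h2⟩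
    exact Finset.mem_erase.2 ⟨by simpa using h2, pvComp_subset_land maps done c hland h1⟩
  have h1 := Finset.card_le_card hsub
  have h2 := Finset.card_erase_of_mem hcL
  have h3 := pvLandSet_card maps
  have h4 : 0 < (maps.length : Int) * pvM maps := by
    apply mul_pos <;> omega
  have h5 : 1 ≤ ((maps.length : Int) * pvM maps).toNat := by omega
  have h6 : 1 ≤ (pvLandSet maps).card := Finset.card_pos.2 ⟨c, hcL⟩
  constructor
  · omega
  · exact h5

lemma pvOuter_go (maps : List String) :
    ∀ (cs : List (Int × Int)), ∀ (v : List (List Bool)) (seen : PySem.Set (Int × Int))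
      (res : List Int) (done : Finset (Int × Int)),
      (∀ c ∈ cs, 0 ≤ c.1 ∧ c.1 < (maps.length : Int) ∧ 0 ≤ c.2 ∧ c.2 < pvM maps) →
      pvRepr maps v done → seen.Nodup → (∀ c : Int × Int, c ∈ seen ↔ c ∈ done) →
      (cs.foldl (fun (st : List (List Bool) × List Int) (c : Int × Int) =>
          if pvGetV st.1 c.1 c.2 = false ∧ pvCh maps c.1 c.2 ≠ 'X' then
            ((pvFillA maps (maps.length : Int) (pvM maps)
                (((maps.length : Int) * pvM maps).toNat + 1) (pvSetV st.1 c.1 c.2) [c] 0).1,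
             st.2 ++ [(pvFillA maps (maps.length : Int) (pvM maps)
                (((maps.length : Int) * pvM maps).toNat + 1) (pvSetV st.1 c.1 c.2) [c] 0).2])
          else st) (v, res)).2
      = (cs.foldl (fun (st : PySem.Set (Int × Int) × List Int) (c : Int × Int) =>
          if PySem.Set.contains st.1 c = true ∨ pvCh maps c.1 c.2 = 'X' then st
          else (PySem.Set.union st.1 (pvGrowB maps (maps.length : Int) (pvM maps) st.1
                  (((maps.length : Int) * pvM maps).toNat + 2) [c]
                  (PySem.Set.add PySem.Set.empty c)),
                st.2 ++ [(pvGrowB maps (maps.length : Int) (pvM maps) st.1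
                  (((maps.length : Int) * pvM maps).toNat + 2) [c]
                  (PySem.Set.add PySem.Set.empty c)).foldl
                    (fun a c => a + pvInt maps c.1 c.2) 0])) (seen, res)).2 := by
  intro cs
  induction cs with
  | nil => intro v seen res done _ _ _ _; rfl
  | cons c cs ih =>
    intro v seen res done hcs hrepr hsnd hseen
    obtain ⟨hb1, hb2, hb3, hb4⟩ := hcs c (by simp)
    simp only [List.foldl_cons]
    by_cases hmem : c ∈ done
    · -- already visited / seen: both sides skip
      have hgetv : pvGetV v c.1 c.2 = true := by
        by_contra hf
        rw [Bool.not_eq_true] at hf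
        exact (pvRepr_read maps v done hrepr c hb1 hb3).1 hf hmem
      have hcontains : PySem.Set.contains seen c = true := by
        rw [PySem.Set.contains_iff]
        exact (hseen c).2 hmem
      rw [if_neg (by rw [hgetv]; simp), if_pos (Or.inl hcontains)]
      exact ih v seen res done (fun c' hc' => hcs c' (by simp [hc'])) hrepr hsnd hseen
    · have hgetv : pvGetV v c.1 c.2 = false :=
        (pvRepr_read maps v done hrepr c hb1 hb3).2 hmem
      have hcontains : PySem.Set.contains seen c = false :=
        pvContains_of_not_mem (fun h => hmem ((hseen c).1 h))
      by_cases hch : pvCh maps c.1 c.2 = 'X'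
      · -- water: both sides skip
        rw [if_neg (by rw [hgetv]; simp [hch]), if_pos (Or.inr hch)]
        exact ih v seen res done (fun c' hc' => hcs c' (by simp [hc'])) hrepr hsnd hseen
      · -- a fresh island is explored by both sides
        rw [if_pos ⟨hgetv, hch⟩, if_neg (by rw [hcontains]; simp [hch])]
        have hland : pvLandB maps c = true := by
          unfold pvLandB
          rw [decide_eq_true_iff]
          exact ⟨hb1, hb2, hb3, hb4, hch⟩
        obtain ⟨hcard1, hcard2⟩ := pvCardBound maps done c hland
        obtain ⟨c1, c2⟩ := c
        -- A side: the DFS fill collects exactly the component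
        have hreprA : pvRepr maps (pvSetV v c1 c2) (done ∪ {(c1, c2)}) := by
          rw [show done ∪ {(c1, c2)} = insert (c1, c2) done from Finset.union_singleton _ _]
          exact pvRepr_insert maps v done c1 c2 hb1 hb2 hb3 hb4 hrepr
        obtain ⟨hreprA', hsumA⟩ :=
          pvFillA_go maps done (c1, c2) hland (((maps.length : Int) * pvM maps).toNat + 1)
            (pvSetV v c1 c2) [(c1, c2)] 0 0 {(c1, c2)}
            hreprA (by simp) (by simp) (by simp)
            (by simpa using pvMem_comp_self maps done (c1, c2))
            (by intro c' hc' hcn; simp at hc'; simp [hc'] at hcn)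
            (by simp)
            (by simp only [List.length_singleton, List.toFinset_cons, List.toFinset_nil]
                omega)
        -- B side: the frontier saturation collects exactly the component
        have haddempty : PySem.Set.add PySem.Set.empty (c1, c2) = [(c1, c2)] := rfl
        obtain ⟨hKfin, hKnd⟩ :=
          pvGrowB_go maps done (c1, c2) seen hseen hland
            (((maps.length : Int) * pvM maps).toNat + 2) [(c1, c2)]
            (PySem.Set.add PySem.Set.empty (c1, c2))
            (by rw [haddempty]; simp)
            (by rw [haddempty]; simp)
            (by rw [haddempty]; simp)
            (by rw [haddempty]
                simpa using pvMem_comp_self maps done (c1, c2))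
            (by rw [haddempty]
                intro c' hc' hcn
                simp at hc'
                simp [hc'] at hcn)
            (by rw [haddempty]
                have h9 : ([(c1, c2)] : List (Int × Int)).toFinset = {(c1, c2)} := by simp
                rw [h9]
                omega)
        -- both record the same component sum
        have hsumB : (pvGrowB maps (maps.length : Int) (pvM maps) seen
              (((maps.length : Int) * pvM maps).toNat + 2) [(c1, c2)]
              (PySem.Set.add PySem.Set.empty (c1, c2))).foldl
                (fun a c => a + pvInt maps c.1 c.2) 0
            = ∑ d ∈ pvComp maps done (c1, c2), pvInt maps d.1 d.2 := by
          rw [pvFoldSum]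
          rw [← List.sum_toFinset _ hKnd]
          rw [hKfin]
          simp
        have hres : (pvFillA maps (maps.length : Int) (pvM maps)
              (((maps.length : Int) * pvM maps).toNat + 1) (pvSetV v c1 c2) [(c1, c2)] 0).2
            = (pvGrowB maps (maps.length : Int) (pvM maps) seen
              (((maps.length : Int) * pvM maps).toNat + 2) [(c1, c2)]
              (PySem.Set.add PySem.Set.empty (c1, c2))).foldl
                (fun a c => a + pvInt maps c.1 c.2) 0 := by
          rw [hsumA, hsumB]
          simp
        rw [hres]
        apply ih _ _ _ (done ∪ pvComp maps done (c1, c2))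
          (fun c' hc' => hcs c' (by simp [hc'])) hreprA'
          (PySem.Set.nodup_union seen _ hsnd)
        intro c'
        rw [PySem.Set.mem_union]
        constructor
        · rintro (h | h)
          · exact Finset.mem_union_left _ ((hseen c').1 h)
          · exact Finset.mem_union_right _ (by rw [← hKfin]; exact List.mem_toFinset.2 h)
        · intro h
          rcases Finset.mem_union.1 h with h | h
          · exact Or.inl ((hseen c').2 h)
          · exact Or.inr (List.mem_toFinset.1 (by rw [hKfin]; exact h))

-- ===== VERDICT (by name: the statement is the Claim_ definition above) =====
theorem solution_spec : Claim_equal_solution := by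
  intro maps _ _
  unfold Spec_solution
  simp only [solution, solution_alt]
  rw [show PySem.Str.len (PySem.List.pyGetD maps 0 "") = pvM maps from rfl]
  have hA := pvNested maps (fun (st : List (List Bool) × List Int) (c : Int × Int) =>
      if pvGetV st.1 c.1 c.2 = false ∧ pvCh maps c.1 c.2 ≠ 'X' then
        ((pvFillA maps (maps.length : Int) (pvM maps)
            (((maps.length : Int) * pvM maps).toNat + 1) (pvSetV st.1 c.1 c.2) [c] 0).1,
         st.2 ++ [(pvFillA maps (maps.length : Int) (pvM maps)
            (((maps.length : Int) * pvM maps).toNat + 1) (pvSetV st.1 c.1 c.2) [c] 0).2])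
      else st)
    ((PySem.List.pyRange 0 (maps.length : Int) 1).map
      (fun _ => List.replicate (pvM maps).toNat false), ([] : List Int))
  have hB := pvNested maps (fun (st : PySem.Set (Int × Int) × List Int) (c : Int × Int) =>
      if PySem.Set.contains st.1 c = true ∨ pvCh maps c.1 c.2 = 'X' then st
      else (PySem.Set.union st.1 (pvGrowB maps (maps.length : Int) (pvM maps) st.1
              (((maps.length : Int) * pvM maps).toNat + 2) [c]
              (PySem.Set.add PySem.Set.empty c)),
            st.2 ++ [(pvGrowB maps (maps.length : Int) (pvM maps) st.1
              (((maps.length : Int) * pvM maps).toNat + 2) [c]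
              (PySem.Set.add PySem.Set.empty c)).foldl
                (fun a c => a + pvInt maps c.1 c.2) 0]))
    ((PySem.Set.empty : PySem.Set (Int × Int)), ([] : List Int))
  dsimp only at hA hB
  rw [hA, hB]
  have hmain := pvOuter_go maps (pvCells maps)
    ((PySem.List.pyRange 0 (maps.length : Int) 1).map
      (fun _ => List.replicate (pvM maps).toNat false))
    PySem.Set.empty [] ∅ (pvCells_bounds maps) (pvRepr_init maps)
    (by simp [PySem.Set.empty])
    (by intro c; simp [PySem.Set.empty])
  rw [hmain]
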